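-- pv_equiv track=rewrite | github.com/hyo-jae-jung/beakjoon | solved/5902.py | solution
-- ===== SOURCE A (Python) =====
-- def solution(arr):
--     i = 1
--     j = len(arr)-2
--
--     while i <= j:
--         if (arr[i]-arr[i-1]) != (arr[j+1]-arr[j]):
--             return 0
--         i+=1
--         j-=1
--
--     return 1
-- ===== SOURCE B (Python) =====
-- def solution(arr):
--     diffs = [b - a for a, b in zip(arr, arr[1:])]
--     return 1 if diffs == diffs[::-1] else 0
-- ===== Notes on version B (the rewrite author's own statement) =====
-- stated objective: idiomatic
-- what changed: Replaces A's in-place two-pointer index scan with materializing the consecutive-difference list once and comparing it to its reversed slice.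
import Mathlib
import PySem

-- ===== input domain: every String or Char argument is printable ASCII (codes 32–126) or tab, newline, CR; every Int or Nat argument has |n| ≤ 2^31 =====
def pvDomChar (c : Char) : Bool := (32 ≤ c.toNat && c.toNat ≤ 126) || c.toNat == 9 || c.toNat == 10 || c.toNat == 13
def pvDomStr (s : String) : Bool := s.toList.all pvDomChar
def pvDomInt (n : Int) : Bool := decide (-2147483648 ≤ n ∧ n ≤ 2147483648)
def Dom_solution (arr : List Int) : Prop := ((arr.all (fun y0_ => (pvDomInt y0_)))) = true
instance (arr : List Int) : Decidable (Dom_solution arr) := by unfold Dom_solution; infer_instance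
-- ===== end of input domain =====

-- B replaces A's in-place two-pointer scan with building the consecutive-difference
-- list once and comparing it against its reversed slice (idiomatic; same O(n) cost).

-- ===== PORT A =====
-- A's while-loop as recursion on (i, j); j - i shrinks by 2 each step, so a fuel of
-- arr.length only makes the recursion structural and is never exhausted (the base
-- case coincides with the loop's own exit, 1).  Whenever the loop body runs
-- (1 = start ≤ i ≤ j ≤ len-2), all four indices are in range, so pyGetD with
-- default 0 is exact (Python never raises here).
def solutionLoop (arr : List Int) (i j : Int) : Nat → Int
  | 0 => 1
  | fuel+1 =>
    if i ≤ j then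
      if PySem.List.pyGetD arr i 0 - PySem.List.pyGetD arr (i-1) 0 ≠
         PySem.List.pyGetD arr (j+1) 0 - PySem.List.pyGetD arr j 0 then 0
      else solutionLoop arr (i+1) (j-1) fuel
    else 1

def solution (arr : List Int) : Int :=
  solutionLoop arr 1 (PySem.List.len arr - 2) arr.length

-- ===== PORT B =====
def solution_alt (arr : List Int) : Int :=
  let diffs := (arr.zip (PySem.List.slice arr (some 1) none)).map (fun p => p.2 - p.1)
  if diffs = (PySem.List.slice? diffs none none (-1)).getD [] then 1 else 0

-- ===== PRECONDITION & SPEC =====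
def Spec_solution (arr : List Int) (out : Int) : Prop := out = solution_alt arr
instance (arr : List Int) (out : Int) : Decidable (Spec_solution arr out) := by unfold Spec_solution; infer_instance

-- ===== CLAIM (what is proved, stated in full; the proofs are below) =====
def Claim_equal_solution : Prop := ∀ (arr : List Int), Dom_solution arr → Spec_solution arr (solution arr)

-- ===== LEMMAS AND PROOFS =====

-- The consecutive-difference list (proof-side name for B's `diffs`).
def pvD (arr : List Int) : List Int := (arr.zip arr.tail).map (fun p => p.2 - p.1)

lemma pvD_length (arr : List Int) : (pvD arr).length = arr.length - 1 := by
  simp [pvD]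

lemma pvD_getD (arr : List Int) (k : Nat) (hk : k < (pvD arr).length) :
    (pvD arr).getD k 0 = arr.getD (k+1) 0 - arr.getD k 0 := by
  have hlen := pvD_length arr
  have hk1 : k + 1 < arr.length := by omega
  have hk0 : k < arr.length := by omega
  have hkz : k < (arr.zip arr.tail).length := by simpa [pvD] using hk
  rw [List.getD_eq_getElem _ _ hk, List.getD_eq_getElem _ _ hk1, List.getD_eq_getElem _ _ hk0]
  simp [pvD, List.getElem_zip, List.getElem_tail]

-- The loop's test value equals an entry of the difference list.
lemma pvTest_eq (arr : List Int) (k : Nat) (hk : k < (pvD arr).length) :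
    PySem.List.pyGetD arr ((k:Int)+1) 0 - PySem.List.pyGetD arr (k:Int) 0
      = (pvD arr).getD k 0 := by
  have h1 : ((k:Int)+1) = ((k+1 : Nat) : Int) := by push_cast; ring
  rw [h1, PySem.List.pyGetD_natCast, PySem.List.pyGetD_natCast, pvD_getD arr k hk]

-- The two-pointer invariant: all mirror pairs with left index in [lo, hi] agree.
def pvC (d : List Int) (lo hi : Int) : Prop :=
  ∀ k : Nat, lo ≤ (k:Int) → (k:Int) ≤ hi → d.getD k 0 = d.getD (d.length - 1 - k) 0

lemma pvReverse_getD (d : List Int) (k : Nat) (hk : k < d.length) :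
    d.reverse.getD k 0 = d.getD (d.length - 1 - k) 0 := by
  have hk' : k < d.reverse.length := by simpa using hk
  have hk'' : d.length - 1 - k < d.length := by omega
  rw [List.getD_eq_getElem _ _ hk', List.getD_eq_getElem _ _ hk'']
  simp [List.getElem_reverse]

lemma pvLoop_one_of (arr : List Int) (fuel : Nat) :
    ∀ i j : Int, 1 ≤ i → i + j = ((pvD arr).length : Int) → j + 1 - i ≤ 2*(fuel:Int) →
      pvC (pvD arr) (i-1) j → solutionLoop arr i j fuel = 1 := by
  induction fuel with
  | zero => intro i j h1 h2 hf hC; rfl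
  | succ f ih =>
    intro i j h1 h2 hf hC
    simp only [solutionLoop]
    by_cases hij : i ≤ j
    · have hm : 0 ≤ j := by omega
      have hkl : (i-1).toNat < (pvD arr).length := by omega
      have hkr : j.toNat < (pvD arr).length := by omega
      have el := pvTest_eq arr (i-1).toNat hkl
      have er := pvTest_eq arr j.toNat hkr
      have hi' : ((i-1).toNat : Int) + 1 = i := by omega
      rw [hi'] at el
      have hi'' : ((i-1).toNat : Int) = i - 1 := by omega
      rw [hi''] at el
      have hj' : (j.toNat : Int) = j := by omega
      rw [hj'] at er
      have hmir : (pvD arr).length - 1 - (i-1).toNat = j.toNat := by omega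
      have heq : PySem.List.pyGetD arr i 0 - PySem.List.pyGetD arr (i-1) 0 =
          PySem.List.pyGetD arr (j+1) 0 - PySem.List.pyGetD arr j 0 := by
        rw [el, er]
        have := hC (i-1).toNat (by omega) (by omega)
        rw [hmir] at this
        exact this
      rw [if_pos hij, if_neg (by simpa using heq)]
      exact ih (i+1) (j-1) (by omega) (by omega) (by push_cast at hf ⊢; omega)
        (fun k hk1 hk2 => hC k (by omega) (by omega))
    · rw [if_neg hij]

lemma pvLoop_sound (arr : List Int) (fuel : Nat) :
    ∀ i j : Int, 1 ≤ i → i + j = ((pvD arr).length : Int) → j + 1 - i ≤ 2*(fuel:Int) →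
      solutionLoop arr i j fuel = 1 → pvC (pvD arr) (i-1) j := by
  induction fuel with
  | zero =>
    intro i j h1 h2 hf _ k hk1 hk2
    have hkj : (k:Int) = j := by omega
    have : (pvD arr).length - 1 - k = k := by omega
    rw [this]
  | succ f ih =>
    intro i j h1 h2 hf hres
    simp only [solutionLoop] at hres
    by_cases hij : i ≤ j
    · rw [if_pos hij] at hres
      by_cases hne : PySem.List.pyGetD arr i 0 - PySem.List.pyGetD arr (i-1) 0 ≠
          PySem.List.pyGetD arr (j+1) 0 - PySem.List.pyGetD arr j 0
      · rw [if_pos hne] at hres; exact absurd hres (by norm_num)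
      · rw [if_neg hne] at hres
        rw [not_not] at hne
        have iha := ih (i+1) (j-1) (by omega) (by omega) (by push_cast at hf ⊢; omega) hres
        have hm : 0 ≤ j := by omega
        have hkl : (i-1).toNat < (pvD arr).length := by omega
        have hkr : j.toNat < (pvD arr).length := by omega
        have el := pvTest_eq arr (i-1).toNat hkl
        have er := pvTest_eq arr j.toNat hkr
        have hi' : ((i-1).toNat : Int) + 1 = i := by omega
        have hi'' : ((i-1).toNat : Int) = i - 1 := by omega
        have hj' : (j.toNat : Int) = j := by omega
        rw [hi', hi''] at el
        rw [hj'] at er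
        have hpair : (pvD arr).getD (i-1).toNat 0 = (pvD arr).getD j.toNat 0 := by
          rw [← el, ← er]; exact hne
        intro k hk1 hk2
        by_cases hkl' : (k:Int) = i - 1
        · have hkk : k = (i-1).toNat := by omega
          rw [hkk, show (pvD arr).length - 1 - (i-1).toNat = j.toNat by omega]
          exact hpair
        · by_cases hkr' : (k:Int) = j
          · have hkk : k = j.toNat := by omega
            rw [hkk, show (pvD arr).length - 1 - j.toNat = (i-1).toNat by omega]
            exact hpair.symm
          · exact iha k (by omega) (by omega)
    · rw [if_neg hij] at hres
      intro k hk1 hk2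
      have hkj : (k:Int) = j := by omega
      have : (pvD arr).length - 1 - k = k := by omega
      rw [this]

lemma pvLoop_cases (arr : List Int) (fuel : Nat) :
    ∀ i j : Int, solutionLoop arr i j fuel = 1 ∨ solutionLoop arr i j fuel = 0 := by
  induction fuel with
  | zero => intro i j; left; rfl
  | succ f ih =>
    intro i j
    simp only [solutionLoop]
    by_cases hij : i ≤ j
    · rw [if_pos hij]
      by_cases hne : PySem.List.pyGetD arr i 0 - PySem.List.pyGetD arr (i-1) 0 ≠
          PySem.List.pyGetD arr (j+1) 0 - PySem.List.pyGetD arr j 0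
      · rw [if_pos hne]; right; rfl
      · rw [if_neg hne]; exact ih (i+1) (j-1)
    · rw [if_neg hij]; left; rfl

lemma pvAlt_eq (arr : List Int) :
    solution_alt arr = if pvD arr = (pvD arr).reverse then 1 else 0 := by
  simp only [solution_alt, pvD, PySem.List.slice_from_one,
    PySem.List.slice?_none_none_neg_one, Option.getD_some]
  rfl

lemma pvPal_iff (d : List Int) :
    d = d.reverse ↔ ∀ k : Nat, k < d.length → d.getD k 0 = d.getD (d.length - 1 - k) 0 := by
  constructor
  · intro h k hk
    rw [← pvReverse_getD d k hk]
    exact congrArg (fun l => l.getD k 0) h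
  · intro h
    apply List.ext_getElem (by simp)
    intro k hk hk'
    have := h k hk
    rw [List.getD_eq_getElem _ _ hk] at this
    have hm : d.length - 1 - k < d.length := by omega
    rw [List.getD_eq_getElem _ _ hm] at this
    rw [this]
    simp [List.getElem_reverse]

-- ===== VERDICT (by name: the statement is the Claim_ definition above) =====
theorem solution_spec : Claim_equal_solution := by
  intro arr _
  unfold Spec_solution solution
  rw [pvAlt_eq]
  have hlen : PySem.List.len arr = (arr.length : Int) := PySem.List.len_eq arr
  have hd := pvD_length arr
  by_cases hsmall : arr.length ≤ 1
  · have hnil : pvD arr = [] := List.eq_nil_of_length_eq_zero (by omega)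
    rw [hnil, if_pos (show ([]:List Int) = ([]:List Int).reverse from rfl)]
    have hn : arr.length = 0 ∨ arr.length = 1 := by omega
    rcases hn with hn | hn <;> rw [hlen, hn] <;> simp [solutionLoop]
  · have h2 : (1:Int) + (PySem.List.len arr - 2) = ((pvD arr).length : Int) := by
      rw [hlen]; omega
    by_cases hpal : pvD arr = (pvD arr).reverse
    · rw [if_pos hpal]
      apply pvLoop_one_of arr arr.length 1 (PySem.List.len arr - 2) (by omega) h2
        (by rw [hlen]; omega)
      intro k hk1 hk2
      exact (pvPal_iff (pvD arr)).mp hpal k (by omega)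
    · rw [if_neg hpal]
      rcases pvLoop_cases arr arr.length 1 (PySem.List.len arr - 2) with h1 | h0
      · exfalso
        apply hpal
        rw [pvPal_iff]
        intro k hk
        exact pvLoop_sound arr arr.length 1 (PySem.List.len arr - 2) (by omega) h2
          (by rw [hlen]; omega) h1 k (by omega) (by omega)
      · exact h0
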